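-- pv_equiv track=rewrite | github.com/python-ai-bootcamp/myChatImposter | evals/periodic_group_tracking_scorer.py | messages_match
-- ===== SOURCE A (Python) =====
-- from typing import List, Dict, Any, Optional
--
-- def messages_match(expected_messages: List[Dict], response_messages: List[Dict]) -> bool:
--     """
--     Check bidirectional containment of relevant_task_messages.
--
--     Both lists must contain the same messages (order independent).
--     Matching is done on originating_time, sender, and content.
--     """
--     if not expected_messages and not response_messages:
--         return True
--
--     if len(expected_messages) != len(response_messages):
--         return False
--
--     def normalize(msg: Dict) -> tuple:
--         return (
--             msg.get("originating_time", "").strip(),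
--             msg.get("sender", "").strip(),
--             msg.get("content", "").strip()
--         )
--
--     expected_set = set(normalize(m) for m in expected_messages)
--     response_set = set(normalize(m) for m in response_messages)
--
--     return expected_set == response_set
-- ===== SOURCE B (Python) =====
-- def messages_match(expected_messages, response_messages):
--     """
--     Check bidirectional containment of relevant_task_messages.
--
--     Same guards as the original; then compare canonical forms built by
--     sorting the normalized tuples and dropping consecutive duplicates
--     (sort-based deduplication instead of hash sets).
--     """
--     if not expected_messages and not response_messages:
--         return True
--
--     if len(expected_messages) != len(response_messages):
--         return False
--
--     def normalize(msg):
--         return (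
--             msg.get("originating_time", "").strip(),
--             msg.get("sender", "").strip(),
--             msg.get("content", "").strip(),
--         )
--
--     def canonical(msgs):
--         out = []
--         for t in sorted(normalize(m) for m in msgs):
--             if not out or out[-1] != t:
--                 out.append(t)
--         return out
--
--     return canonical(expected_messages) == canonical(response_messages)
-- ===== Notes on version B (the rewrite author's own statement) =====
-- stated objective: alternative
-- what changed: Replaces the two hash sets and set equality by sort-based canonicalization: each list of normalized tuples is sorted and consecutive duplicates are dropped, and the two canonical sequences are compared for equality (no hashing container anywhere).
import Mathlib
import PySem

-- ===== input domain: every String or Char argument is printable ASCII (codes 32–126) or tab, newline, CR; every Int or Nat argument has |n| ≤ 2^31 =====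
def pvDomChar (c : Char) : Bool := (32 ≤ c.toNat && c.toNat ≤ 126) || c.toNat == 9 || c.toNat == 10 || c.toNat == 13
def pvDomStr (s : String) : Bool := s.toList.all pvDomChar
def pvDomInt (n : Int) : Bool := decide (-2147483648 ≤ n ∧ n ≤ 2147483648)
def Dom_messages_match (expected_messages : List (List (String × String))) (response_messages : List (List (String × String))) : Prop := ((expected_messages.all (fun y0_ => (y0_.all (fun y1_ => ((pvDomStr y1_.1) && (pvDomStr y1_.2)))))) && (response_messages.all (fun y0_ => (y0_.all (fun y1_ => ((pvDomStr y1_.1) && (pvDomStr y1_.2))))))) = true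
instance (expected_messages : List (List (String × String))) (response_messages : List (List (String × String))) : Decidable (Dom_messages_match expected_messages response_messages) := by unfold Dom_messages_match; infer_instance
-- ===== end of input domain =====

-- B replaces A's two hash sets and set-equality by sort-based canonicalization:
-- sort the normalized tuples, drop consecutive duplicates, compare the canonical
-- sequences (alternative decomposition; not faster).


-- ===== PORT A =====
-- normalize(msg): strip the three relevant fields, missing defaults to ""
def pvNormalize (msg : List (String × String)) : String × String × String :=
  (PySem.Str.strip (PySem.Dict.getD (PySem.Dict.mk msg) "originating_time" ""),
   PySem.Str.strip (PySem.Dict.getD (PySem.Dict.mk msg) "sender" ""),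
   PySem.Str.strip (PySem.Dict.getD (PySem.Dict.mk msg) "content" ""))

def messages_match (expected_messages : List (List (String × String))) (response_messages : List (List (String × String))) : Bool :=
  if expected_messages = [] ∧ response_messages = [] then true
  else if expected_messages.length ≠ response_messages.length then false
  else
    let expected_set := PySem.Set.ofList (expected_messages.map pvNormalize)
    let response_set := PySem.Set.ofList (response_messages.map pvNormalize)
    PySem.Set.equal expected_set response_set

-- ===== PORT B =====
-- Python's lexicographic tuple comparison, as a sort key into a Lex product
def pvKey (t : String × String × String) : Lex (String × Lex (String × String)) :=
  toLex (t.1, toLex (t.2.1, t.2.2))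

-- the loop body of canonical(): append t unless it repeats the last appended tuple
def pvDedupStep (out : List (String × String × String)) (t : String × String × String) :
    List (String × String × String) :=
  if out = [] ∨ out.getLast? ≠ some t then out ++ [t] else out

-- canonical(msgs): sort the normalized tuples, drop consecutive duplicates
def pvCanonical (msgs : List (List (String × String))) : List (String × String × String) :=
  (PySem.List.sorted (msgs.map pvNormalize) pvKey false).foldl pvDedupStep []

def messages_match_alt (expected_messages : List (List (String × String))) (response_messages : List (List (String × String))) : Bool :=
  if expected_messages = [] ∧ response_messages = [] then true
  else if expected_messages.length ≠ response_messages.length then false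
  else pvCanonical expected_messages == pvCanonical response_messages

-- ===== PRECONDITION & SPEC =====
def Spec_messages_match (expected_messages : List (List (String × String))) (response_messages : List (List (String × String))) (out : Bool) : Prop := out = messages_match_alt expected_messages response_messages
instance (expected_messages : List (List (String × String))) (response_messages : List (List (String × String))) (out : Bool) : Decidable (Spec_messages_match expected_messages response_messages out) := by unfold Spec_messages_match; infer_instance

-- ===== CLAIM (what is proved, stated in full; the proofs are below) =====
def Claim_equal_messages_match : Prop := ∀ (expected_messages : List (List (String × String))) (response_messages : List (List (String × String))), Dom_messages_match expected_messages response_messages → Spec_messages_match expected_messages response_messages (messages_match expected_messages response_messages)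

-- ===== LEMMAS AND PROOFS =====

theorem pvKey_injective : Function.Injective pvKey := by
  intro a b h
  unfold pvKey at h
  have h1 := congrArg (fun x => (ofLex x).1) h
  have h2 := congrArg (fun x => (ofLex (ofLex x).2).1) h
  have h3 := congrArg (fun x => (ofLex (ofLex x).2).2) h
  simp at h1 h2 h3
  exact Prod.ext h1 (Prod.ext h2 h3)

-- recursive companions of the dedup fold
def pvGo (a : String × String × String) : List (String × String × String) → List (String × String × String)
  | [] => []
  | b :: t => if b = a then pvGo a t else b :: pvGo b t

def pvDed : List (String × String × String) → List (String × String × String)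
  | [] => []
  | a :: t => a :: pvGo a t

theorem pv_foldl_go (l : List (String × String × String)) :
    ∀ (out : List (String × String × String)) (a : String × String × String),
      out.getLast? = some a → l.foldl pvDedupStep out = out ++ pvGo a l := by
  induction l with
  | nil => intro out a _; simp [pvGo]
  | cons b t ih =>
    intro out a hlast
    have hne : out ≠ [] := by intro h; simp [h] at hlast
    by_cases hba : b = a
    · subst hba
      have : pvDedupStep out b = out := by
        unfold pvDedupStep; simp [hne, hlast]
      simp only [List.foldl_cons, this, pvGo]
      exact ih out b hlast
    · have : pvDedupStep out b = out ++ [b] := by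
        unfold pvDedupStep
        have : out.getLast? ≠ some b := by rw [hlast]; simp [Ne.symm hba]
        simp [this]
      simp only [List.foldl_cons, this, pvGo, if_neg hba]
      rw [ih (out ++ [b]) b (by simp)]
      simp

theorem pv_foldl_ded (l : List (String × String × String)) :
    l.foldl pvDedupStep [] = pvDed l := by
  cases l with
  | nil => rfl
  | cons a t =>
    simp only [List.foldl_cons, pvDed]
    have : pvDedupStep [] a = [a] := by unfold pvDedupStep; simp
    rw [this, pv_foldl_go t [a] a (by simp)]
    rfl

theorem pvGo_subset (a : String × String × String) (l : List (String × String × String)) :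
    ∀ x ∈ pvGo a l, x ∈ l := by
  induction l generalizing a with
  | nil => simp [pvGo]
  | cons b t ih =>
    intro x hx
    unfold pvGo at hx
    split at hx
    · exact List.mem_cons_of_mem _ (ih a x hx)
    · rcases List.mem_cons.1 hx with h | h
      · exact h ▸ List.mem_cons_self
      · exact List.mem_cons_of_mem _ (ih b x h)

theorem pvGo_mem (a : String × String × String) (l : List (String × String × String))
    (hs : (a :: l).Pairwise (fun u v => pvKey u ≤ pvKey v)) :
    ∀ x ∈ l, x ∈ a :: pvGo a l := by
  induction l generalizing a with
  | nil => simp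
  | cons b t ih =>
    intro x hx
    unfold pvGo
    rcases List.pairwise_cons.1 hs with ⟨_, hst⟩
    by_cases hba : b = a
    · rw [if_pos hba]
      rcases List.mem_cons.1 hx with h | h
      · subst h; rw [hba]; exact List.mem_cons_self
      · subst hba
        have hs' : (b :: t).Pairwise (fun u v => pvKey u ≤ pvKey v) := hst
        exact ih b hs' x h
    · rw [if_neg hba]
      rcases List.mem_cons.1 hx with h | h
      · subst h; exact List.mem_cons_of_mem _ List.mem_cons_self
      · exact List.mem_cons_of_mem _ (ih b hst x h)

theorem pvGo_pairwise (a : String × String × String) (l : List (String × String × String))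
    (hs : (a :: l).Pairwise (fun u v => pvKey u ≤ pvKey v)) :
    (a :: pvGo a l).Pairwise (fun u v => pvKey u < pvKey v) := by
  induction l generalizing a with
  | nil => simp [pvGo]
  | cons b t ih =>
    rcases List.pairwise_cons.1 hs with ⟨hab, hst⟩
    unfold pvGo
    by_cases hba : b = a
    · rw [if_pos hba]
      subst hba
      exact ih b hst
    · rw [if_neg hba]
      have hlt : pvKey a < pvKey b := by
        rcases lt_or_eq_of_le (hab b List.mem_cons_self) with h | h
        · exact h
        · exact absurd (pvKey_injective h) (Ne.symm hba)
      have hrest := ih b hst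
      refine List.pairwise_cons.2 ⟨?_, hrest⟩
      intro x hx
      rcases List.mem_cons.1 hx with h | h
      · exact h ▸ hlt
      · have hxt : x ∈ t := pvGo_subset b t x h
        have : pvKey b ≤ pvKey x := (List.pairwise_cons.1 hst).1 x hxt
        exact lt_of_lt_of_le hlt this

theorem pvDed_mem (l : List (String × String × String))
    (hs : l.Pairwise (fun u v => pvKey u ≤ pvKey v)) :
    ∀ x, x ∈ pvDed l ↔ x ∈ l := by
  intro x
  cases l with
  | nil => simp [pvDed]
  | cons a t =>
    unfold pvDed
    constructor
    · intro hx
      rcases List.mem_cons.1 hx with h | h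
      · exact h ▸ List.mem_cons_self
      · exact List.mem_cons_of_mem _ (pvGo_subset a t x h)
    · intro hx
      rcases List.mem_cons.1 hx with h | h
      · exact h ▸ List.mem_cons_self
      · exact pvGo_mem a t hs x h

theorem pvDed_pairwise (l : List (String × String × String))
    (hs : l.Pairwise (fun u v => pvKey u ≤ pvKey v)) :
    (pvDed l).Pairwise (fun u v => pvKey u < pvKey v) := by
  cases l with
  | nil => simp [pvDed]
  | cons a t => exact pvGo_pairwise a t hs

theorem pvDed_nodup (l : List (String × String × String))
    (hs : l.Pairwise (fun u v => pvKey u ≤ pvKey v)) : (pvDed l).Nodup := by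
  refine (pvDed_pairwise l hs).imp ?_
  intro a b h hab
  exact absurd rfl (ne_of_lt (hab ▸ h))

-- canonical(msgs) is sorted(set of normalized tuples)
theorem pvCanonical_eq (msgs : List (List (String × String))) :
    pvCanonical msgs =
      PySem.List.sorted (PySem.Set.ofList (msgs.map pvNormalize)) pvKey false := by
  unfold pvCanonical
  rw [pv_foldl_ded]
  set l := PySem.List.sorted (msgs.map pvNormalize) pvKey false with hl
  have hs : l.Pairwise (fun u v => pvKey u ≤ pvKey v) := PySem.List.sorted_pairwise _ _
  refine (PySem.List.sorted_eq_of_perm_of_pairwise_lt _ _ _ ?_ (pvDed_pairwise l hs)).symm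
  refine (List.perm_ext_iff_of_nodup (pvDed_nodup l hs) (PySem.Set.nodup_ofList _)).2 ?_
  intro x
  rw [pvDed_mem l hs x, PySem.Set.mem_ofList]
  constructor
  · intro h; exact (PySem.List.mem_sorted _ _ _ _).1 h
  · intro h; exact (PySem.List.mem_sorted _ _ _ _).2 h

theorem pv_canonical_iff (E R : List (List (String × String))) :
    (pvCanonical E == pvCanonical R) =
      PySem.Set.equal (PySem.Set.ofList (E.map pvNormalize)) (PySem.Set.ofList (R.map pvNormalize)) := by
  rw [Bool.eq_iff_iff, beq_iff_eq, pvCanonical_eq, pvCanonical_eq, PySem.Set.equal_iff]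
  constructor
  · intro h x
    have h2 := PySem.List.sorted_perm (PySem.Set.ofList (R.map pvNormalize)) pvKey false
    rw [← h] at h2
    have hperm := (PySem.List.sorted_perm (PySem.Set.ofList (E.map pvNormalize)) pvKey false).symm.trans h2
    exact ⟨fun hx => hperm.mem_iff.1 hx, fun hx => hperm.mem_iff.2 hx⟩
  · intro h
    refine PySem.List.sorted_eq_sorted_of_perm _ _ _ pvKey_injective ?_
    refine (List.perm_ext_iff_of_nodup (PySem.Set.nodup_ofList _) (PySem.Set.nodup_ofList _)).2 ?_
    intro x
    exact h x

-- ===== VERDICT (by name: the statement is the Claim_ definition above) =====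
theorem messages_match_spec : Claim_equal_messages_match := by
  intro e r _
  unfold Spec_messages_match messages_match messages_match_alt
  split_ifs with h1 h2
  · rfl
  · rfl
  · exact (pv_canonical_iff e r).symm
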